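-- pv_equiv track=rewrite | github.com/SlimTekDev/ProxyForge | ProxyForge/app.py | _strip_opr_faction_label
-- ===== SOURCE A (Python) =====
-- def _strip_opr_faction_label(display_value):
--     """Remove ' (Official)', ' (Creator)', ' (Guilds)', ' (Gangs)' from dropdown selection to get faction_primary."""
--     if not display_value:
--         return display_value
--     suffixes = (" (Official)", " (Creator)", " (Guilds)", " (Gangs)")
--     while True:
--         changed = False
--         for suffix in suffixes:
--             if display_value.endswith(suffix):
--                 display_value = display_value[: -len(suffix)]
--                 changed = True
--                 break
--         if not changed:
--             break
--     return display_value
-- ===== SOURCE B (Python) =====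
-- def _strip_opr_faction_label(display_value):
--     """Remove ' (Official)', ' (Creator)', ' (Guilds)', ' (Gangs)' from dropdown selection to get faction_primary."""
--     if not display_value:
--         return display_value
--     for suffix in (" (Official)", " (Creator)", " (Guilds)", " (Gangs)"):
--         trimmed = display_value.removesuffix(suffix)
--         if trimmed != display_value:
--             return _strip_opr_faction_label(trimmed)
--     return display_value
-- ===== Notes on version B (the rewrite author's own statement) =====
-- stated objective: simpler
-- what changed: Replaces the while-True loop with a mutable string, a changed flag and break statements by a short recursion: try str.removesuffix for each suffix and recurse on the first one that changes the string.
import Mathlib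
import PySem

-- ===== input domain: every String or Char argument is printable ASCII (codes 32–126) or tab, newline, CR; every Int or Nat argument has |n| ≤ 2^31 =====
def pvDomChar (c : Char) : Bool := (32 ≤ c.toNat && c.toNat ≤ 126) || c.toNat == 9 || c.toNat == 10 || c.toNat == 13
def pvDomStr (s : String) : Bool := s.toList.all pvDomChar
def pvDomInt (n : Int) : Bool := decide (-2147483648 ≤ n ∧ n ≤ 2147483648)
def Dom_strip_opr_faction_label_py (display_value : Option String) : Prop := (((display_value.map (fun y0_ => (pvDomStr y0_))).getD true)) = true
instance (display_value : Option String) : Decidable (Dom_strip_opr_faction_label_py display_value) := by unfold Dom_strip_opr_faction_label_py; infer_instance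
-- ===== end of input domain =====

-- B replaces A's while-loop/changed-flag/break peeling by a short recursion on str.removesuffix (objective: simpler).

-- ===== PORT A =====
-- the tuple 'suffixes'
def pvASuffixes : List (List Char) :=
  [(" (Official)").toList, (" (Creator)").toList, (" (Guilds)").toList, (" (Gangs)").toList]

-- body of 'for suffix in suffixes' with its break: state = (display_value, changed); once changed, the rest is skipped
def pvAStep (st : List Char × Bool) (suf : List Char) : List Char × Bool :=
  if st.2 then st
  else if PySem.Chars.endswith st.1 suf then
    (PySem.Chars.slice st.1 none (some (-(suf.length : Int))), true)  -- display_value[: -len(suffix)]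
  else st

def pvAInner (s : List Char) : List Char × Bool :=
  pvASuffixes.foldl pvAStep (s, false)

-- termination lemmas for the while-loop (cited by pvALoop's decreasing_by)
theorem pvAFold_shorter (sufs : List (List Char)) (hall : ∀ suf ∈ sufs, 0 < suf.length)
    (s t : List Char) (h : sufs.foldl pvAStep (s, false) = (t, true)) :
    t.length < s.length := by
  induction sufs with
  | nil => simp [List.foldl] at h
  | cons suf rest ih =>
    simp only [List.foldl, pvAStep, Bool.false_eq_true, if_false] at h
    by_cases hend : PySem.Chars.endswith s suf = true
    · rw [if_pos hend] at h
      have hfix : ∀ (bs : List (List Char)) (t : List Char × Bool),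
          t.2 = true → bs.foldl pvAStep t = t := by
        intro bs
        induction bs with
        | nil => exact fun t _ => rfl
        | cons a b ihb => intro t ht; rw [List.foldl, pvAStep, if_pos ht]; exact ihb t ht
      rw [hfix rest _ rfl] at h
      obtain ⟨ht, -⟩ := Prod.mk.injEq .. ▸ h
      subst ht
      have hpos := hall suf (by simp)
      have hlen := ((PySem.Chars.endswith_iff _ _).mp hend).length_le
      simp only [PySem.Chars.slice_eq_listSlice]
      rw [PySem.List.slice_to_neg_natCast s suf.length hpos]
      simp
      omega
    · rw [if_neg hend] at h
      exact ih (fun x hx => hall x (by simp [hx])) h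

theorem pvAInner_true_shorter (s t : List Char) (h : pvAInner s = (t, true)) :
    t.length < s.length :=
  pvAFold_shorter pvASuffixes (by decide) s t h

-- 'while True: … ; if not changed: break'
def pvALoop (s : List Char) : List Char :=
  match h : pvAInner s with
  | (t, true) => pvALoop t
  | (t, false) => t
termination_by s.length
decreasing_by exact pvAInner_true_shorter _ _ h

def strip_opr_faction_label_py (display_value : Option String) : Option String :=
  match display_value with
  | none => none                       -- 'if not display_value: return display_value'
  | some s => if s = "" then some s else some (String.ofList (pvALoop s.toList))

-- ===== PORT B =====
-- str.removesuffix (not in PySem): exact — drops suffix iff it is a suffix, else returns s unchanged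
def pvRemovesuffix (s suf : List Char) : List Char :=
  if suf.isSuffixOf s then s.take (s.length - suf.length) else s

-- the 'for suffix in …: trimmed = …; if trimmed != display_value: return …(trimmed)' early-return chain
def pvBFirst : List (List Char) → List Char → Option (List Char)
  | [], _ => none
  | suf :: rest, s =>
    let trimmed := pvRemovesuffix s suf
    if trimmed ≠ s then some trimmed else pvBFirst rest s

-- termination lemma for the recursion (cited by pvBGo's decreasing_by)
theorem pvBFirst_shorter (sufs : List (List Char)) (s t : List Char)
    (h : pvBFirst sufs s = some t) : t.length < s.length := by
  induction sufs with
  | nil => simp [pvBFirst] at h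
  | cons suf rest ih =>
    simp only [pvBFirst] at h
    split_ifs at h with hne
    · obtain rfl : pvRemovesuffix s suf = t := by simpa using h
      unfold pvRemovesuffix at hne ⊢
      split_ifs at hne ⊢ with hsuf
      · have hle := (List.isSuffixOf_iff_suffix.mp hsuf).length_le
        rcases Nat.eq_zero_or_pos suf.length with h0 | hpos
        · exact absurd (List.take_of_length_le (by omega)) hne
        · simp; omega
      · exact absurd rfl hne
    · exact ih h

def pvBGo (s : List Char) : List Char :=
  if s = [] then s  -- the recursion re-enters through the 'if not display_value' guard
  else
    match h : pvBFirst pvASuffixes s with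
    | some trimmed => pvBGo trimmed
    | none => s
termination_by s.length
decreasing_by exact pvBFirst_shorter _ _ _ h

def strip_opr_faction_label_py_alt (display_value : Option String) : Option String :=
  match display_value with
  | none => none
  | some s => if s = "" then some s else some (String.ofList (pvBGo s.toList))

-- ===== PRECONDITION & SPEC =====
def Spec_strip_opr_faction_label_py (display_value : Option String) (out : Option String) : Prop := out = strip_opr_faction_label_py_alt display_value
instance (display_value : Option String) (out : Option String) : Decidable (Spec_strip_opr_faction_label_py display_value out) := by unfold Spec_strip_opr_faction_label_py; infer_instance

-- ===== CLAIM (what is proved, stated in full; the proofs are below) =====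
def Claim_equal_strip_opr_faction_label_py : Prop := ∀ (display_value : Option String), Dom_strip_opr_faction_label_py display_value → Spec_strip_opr_faction_label_py display_value (strip_opr_faction_label_py display_value)

-- ===== LEMMAS AND PROOFS =====

-- the break-state fold is inert once changed = true
theorem pvAFold_true (sufs : List (List Char)) (t : List Char) :
    sufs.foldl pvAStep (t, true) = (t, true) := by
  induction sufs with
  | nil => rfl
  | cons a b ihb => simpa [List.foldl, pvAStep] using ihb

-- one suffix: A's endswith-and-slice step agrees with B's removesuffix step
theorem pvStep_eq (s suf : List Char) (h2 : 0 < suf.length) :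
    (if PySem.Chars.endswith s suf then
        some (PySem.List.slice s none (some (-(suf.length : Int)))) else none)
      = (if pvRemovesuffix s suf ≠ s then some (pvRemovesuffix s suf) else none) := by
  unfold pvRemovesuffix
  by_cases hsuf : suf.isSuffixOf s
  · have hs : suf <:+ s := List.isSuffixOf_iff_suffix.mp hsuf
    have hend : PySem.Chars.endswith s suf = true := (PySem.Chars.endswith_iff _ _).mpr hs
    have hlen := hs.length_le
    have hne : s.take (s.length - suf.length) ≠ s := by
      intro he
      have := congrArg List.length he
      simp at this
      omega
    simp only [hsuf, hend, if_pos, ne_eq, not_false_eq_true, hne]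
    congr 1
    exact PySem.List.slice_to_neg_natCast s suf.length h2
  · have hend : PySem.Chars.endswith s suf = false := by
      rw [← Bool.not_eq_true, PySem.Chars.endswith_iff]
      intro hs
      exact hsuf (List.isSuffixOf_iff_suffix.mpr hs)
    simp [hsuf, hend]

-- A's inner for-loop result, expressed through B's first-change search
theorem pvInner_fold_eq (sufs : List (List Char)) (hall : ∀ suf ∈ sufs, 0 < suf.length)
    (s : List Char) :
    sufs.foldl pvAStep (s, false)
      = (match pvBFirst sufs s with
         | some t => (t, true)
         | none => (s, false)) := by
  induction sufs with
  | nil => rfl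
  | cons suf rest ih =>
    have hstep := pvStep_eq s suf (hall suf (by simp))
    simp only [List.foldl, pvAStep, Bool.false_eq_true, if_false,
      PySem.Chars.slice_eq_listSlice]
    by_cases hend : PySem.Chars.endswith s suf = true
    · rw [if_pos hend]
      rw [if_pos hend] at hstep
      rw [pvAFold_true]
      by_cases hne : pvRemovesuffix s suf ≠ s
      · rw [if_pos hne] at hstep
        simp only [Option.some.injEq] at hstep
        simp [pvBFirst, hne, hstep]
      · rw [if_neg hne] at hstep
        simp at hstep
    · rw [if_neg hend]
      rw [if_neg hend] at hstep
      by_cases hne : pvRemovesuffix s suf ≠ s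
      · rw [if_pos hne] at hstep
        simp at hstep
      · push_neg at hne
        simp only [pvBFirst]
        rw [if_neg (by simpa using hne)]
        exact ih (fun x hx => hall x (by simp [hx]))

theorem pvInner_eq (s : List Char) :
    pvAInner s = (match pvBFirst pvASuffixes s with
                  | some t => (t, true)
                  | none => (s, false)) :=
  pvInner_fold_eq pvASuffixes (by decide) s

theorem pvLoop_nil : pvALoop [] = pvBGo [] := by
  rw [pvALoop, pvBGo, if_pos rfl]
  have ha : pvAInner ([] : List Char) = ([], false) := by decide
  split
  · rename_i t heq
    rw [ha] at heq
    simp at heq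
  · rename_i t heq
    rw [ha] at heq
    exact (Prod.mk.inj heq).1.symm

-- the loops agree everywhere (strong induction on the length)
theorem pvLoop_eq_aux : ∀ (n : Nat) (s : List Char), s.length ≤ n → pvALoop s = pvBGo s := by
  intro n
  induction n with
  | zero =>
    intro s hs
    have hnil : s = [] := List.length_eq_zero_iff.mp (Nat.le_zero.mp hs)
    subst hnil
    exact pvLoop_nil
  | succ n ihn =>
    intro s hs
    by_cases hnil : s = []
    · subst hnil; exact pvLoop_nil
    · rw [pvALoop, pvBGo, if_neg hnil]
      have h' := pvInner_eq s
      split <;> rename_i u hu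
      · -- A changed: pvAInner s = (u, true)
        split
        · rename_i v hv
          rw [hv] at h'
          rw [h'] at hu
          rw [← (Prod.mk.inj hu).1]
          exact ihn v (by
            have := pvBFirst_shorter pvASuffixes s v hv
            omega)
        · rename_i hv
          rw [hv] at h'
          rw [h'] at hu
          simp at hu
      · -- A unchanged: pvAInner s = (u, false)
        split
        · rename_i v hv
          rw [hv] at h'
          rw [h'] at hu
          simp at hu
        · rename_i hv
          rw [hv] at h'
          rw [h'] at hu
          exact (Prod.mk.inj hu).1.symm

theorem pvLoop_eq (s : List Char) : pvALoop s = pvBGo s :=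
  pvLoop_eq_aux s.length s le_rfl

-- ===== VERDICT (by name: the statement is the Claim_ definition above) =====
theorem strip_opr_faction_label_py_spec : Claim_equal_strip_opr_faction_label_py := by
  intro dv _
  unfold Spec_strip_opr_faction_label_py strip_opr_faction_label_py strip_opr_faction_label_py_alt
  cases dv with
  | none => rfl
  | some s => by_cases h : s = "" <;> simp [h, pvLoop_eq]
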